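-- pv_equiv track=rewrite | github.com/seanbrede/Leetcode | 0338_Counting_Bits (original).py | getPowersOfTwoUpTo
-- ===== SOURCE A (Python) =====
-- def getPowersOfTwoUpTo(n):
--     powers_of_two = []
--     x, y = 0, 0
--     while y <= n:
--         y = 2 ** x
--         powers_of_two.append(y)
--         x += 1
--     powers_of_two.reverse()
--     return powers_of_two
-- ===== SOURCE B (Python) =====
-- def getPowersOfTwoUpTo(n):
--     if n < 0:
--         return []
--     val, cnt = 1, 0
--     while val <= n:
--         val *= 2
--         cnt += 1
--     return [2 ** i for i in range(cnt, -1, -1)]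
-- ===== Notes on version B (the rewrite author's own statement) =====
-- stated objective: alternative
-- what changed: B replaces A's accumulate-then-reverse list loop by a doubling counter loop that only counts the powers needed, then emits the result directly in descending order via a downward range comprehension.
import Mathlib
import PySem

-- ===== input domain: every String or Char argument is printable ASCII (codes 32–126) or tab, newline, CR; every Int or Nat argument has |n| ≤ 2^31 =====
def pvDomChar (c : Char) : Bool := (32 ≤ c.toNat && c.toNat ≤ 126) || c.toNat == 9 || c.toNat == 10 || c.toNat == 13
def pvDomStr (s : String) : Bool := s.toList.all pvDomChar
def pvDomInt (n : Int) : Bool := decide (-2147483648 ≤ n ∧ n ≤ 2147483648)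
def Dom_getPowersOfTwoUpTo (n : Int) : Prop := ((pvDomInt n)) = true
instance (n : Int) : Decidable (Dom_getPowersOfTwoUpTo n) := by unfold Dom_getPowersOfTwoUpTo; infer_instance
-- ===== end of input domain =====

-- B builds the descending list directly from a counted number of doublings instead of
-- appending ascending powers and reversing (objective: alternative decomposition, same cost).

-- ===== PORT A =====
-- while y <= n: y = 2**x; append y; x += 1 — state (x, y, acc); the invariant y < 2^x
-- (true initially: 0 < 1) is carried only for termination ((n+1-y).toNat decreases).
def pvLoopA (n : Int) (x : Nat) (y : Int) (acc : List Int) (hy : y < 2 ^ x) : List Int :=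
  if h : y ≤ n then
    pvLoopA n (x + 1) ((2:Int) ^ x) (acc ++ [(2:Int) ^ x])
      (by have := pow_lt_pow_right₀ (a := (2:Int)) (by norm_num) (Nat.lt_succ_self x); exact this)
  else acc
termination_by (n + 1 - y).toNat
decreasing_by omega

def getPowersOfTwoUpTo (n : Int) : List Int :=
  (pvLoopA n 0 0 [] (by norm_num)).reverse

-- ===== PORT B =====
-- while val <= n: val *= 2; cnt += 1 — the invariant 1 ≤ val is carried only for termination.
def pvCountB (n val cnt : Int) (hv : 1 ≤ val) : Int :=
  if h : val ≤ n then pvCountB n (2 * val) (cnt + 1) (by omega) else cnt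
termination_by (n + 1 - val).toNat
decreasing_by omega

-- [2**i for i in range(cnt, -1, -1)]; every i in the range is ≥ 0, so 2^i.toNat is exact.
def getPowersOfTwoUpTo_alt (n : Int) : List Int :=
  if n < 0 then []
  else
    (PySem.List.pyRange (pvCountB n 1 0 (le_refl 1)) (-1) (-1)).map
      (fun i => (2:Int) ^ i.toNat)

-- ===== PRECONDITION & SPEC =====
def Spec_getPowersOfTwoUpTo (n : Int) (out : List Int) : Prop := out = getPowersOfTwoUpTo_alt n
instance (n : Int) (out : List Int) : Decidable (Spec_getPowersOfTwoUpTo n out) := by unfold Spec_getPowersOfTwoUpTo; infer_instance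

-- ===== CLAIM (what is proved, stated in full; the proofs are below) =====
def Claim_equal_getPowersOfTwoUpTo : Prop := ∀ (n : Int), Dom_getPowersOfTwoUpTo n → Spec_getPowersOfTwoUpTo n (getPowersOfTwoUpTo n)

-- ===== LEMMAS AND PROOFS =====

-- append one more element at the bottom of a countdown range
theorem pyRange_neg_one_snoc (a b : Int) (h : b ≤ a) :
    PySem.List.pyRange a (b - 1) (-1) = PySem.List.pyRange a b (-1) ++ [b] := by
  rw [PySem.List.pyRange_neg_one_eq_reverse, PySem.List.pyRange_neg_one_eq_reverse]
  have hb : b - 1 + 1 = b := by ring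
  rw [hb, PySem.List.pyRange_one_cons (by omega : b < a + 1)]
  simp

theorem pvCountB_ge (n val cnt : Int) (hv : 1 ≤ val) : cnt ≤ pvCountB n val cnt hv := by
  unfold pvCountB
  split
  · have := pvCountB_ge n (2 * val) (cnt + 1) (by omega)
    omega
  · exact le_refl cnt
termination_by (n + 1 - val).toNat
decreasing_by omega

theorem pvLoopA_eq (n : Int) (x : Nat) (acc : List Int) (hy : (2:Int) ^ x < 2 ^ (x + 1))
    (hv : 1 ≤ (2:Int) ^ x) :
    (pvLoopA n (x + 1) ((2:Int) ^ x) acc hy).reverse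
      = (PySem.List.pyRange (pvCountB n ((2:Int) ^ x) (x : Int) hv) (x : Int) (-1)).map
          (fun i => (2:Int) ^ i.toNat) ++ acc.reverse := by
  rw [pvLoopA, pvCountB]
  split
  · have h2 : (2:Int) * 2 ^ x = 2 ^ (x + 1) := by ring
    have hx1 : ((x : Int) + 1) = ((x + 1 : Nat) : Int) := by push_cast; ring
    rw [pvLoopA_eq n (x + 1) (acc ++ [(2:Int) ^ (x + 1)])
      (by have := pow_lt_pow_right₀ (a := (2:Int)) (by norm_num) (Nat.lt_succ_self (x+1)); exact this)
      (one_le_pow₀ (by norm_num))]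
    have hge : ((x + 1 : Nat) : Int) ≤ pvCountB n ((2:Int) ^ (x + 1)) ((x + 1 : Nat) : Int)
        (one_le_pow₀ (by norm_num)) := pvCountB_ge _ _ _ _
    have hsplit := pyRange_neg_one_snoc
      (pvCountB n ((2:Int) ^ (x + 1)) ((x + 1 : Nat) : Int) (one_le_pow₀ (by norm_num)))
      ((x : Int) + 1) (by push_cast at hge ⊢; omega)
    have hx : (x : Int) + 1 - 1 = (x : Int) := by ring
    rw [hx] at hsplit
    -- align the pvCountB proof arguments / casts on both sides
    have hcast : pvCountB n ((2:Int) * 2 ^ x) ((x : Int) + 1) (by omega)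
        = pvCountB n ((2:Int) ^ (x + 1)) ((x + 1 : Nat) : Int) (one_le_pow₀ (by norm_num)) := by
      congr 1
    rw [hcast, hsplit]
    have ht : ((x : Int) + 1).toNat = x + 1 := by omega
    simp [ht]
  · rw [PySem.List.pyRange_neg_one_eq_nil (le_refl (x : Int))]
    simp
termination_by (n + 1 - 2 ^ x).toNat
decreasing_by omega

-- ===== VERDICT (by name: the statement is the Claim_ definition above) =====
theorem getPowersOfTwoUpTo_spec : Claim_equal_getPowersOfTwoUpTo := by
  unfold Claim_equal_getPowersOfTwoUpTo Spec_getPowersOfTwoUpTo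
  intro n _
  unfold getPowersOfTwoUpTo getPowersOfTwoUpTo_alt
  rw [pvLoopA]
  split
  · -- 0 ≤ n
    rename_i h
    rw [if_neg (by omega)]
    have h0 : ((2:Int) ^ (0:Nat)) = 1 := by norm_num
    have := pvLoopA_eq n 0 ([] ++ [(2:Int) ^ (0:Nat)])
      (by norm_num) (by norm_num)
    simp only [Nat.cast_zero] at this
    rw [show ([] ++ [(2:Int) ^ (0:Nat)]) = [(1:Int)] by norm_num] at this ⊢
    rw [this]
    have hge : (0:Int) ≤ pvCountB n ((2:Int) ^ (0:Nat)) 0 (by norm_num) := pvCountB_ge _ _ _ _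
    have hsplit := pyRange_neg_one_snoc (pvCountB n ((2:Int) ^ (0:Nat)) 0 (by norm_num)) 0 hge
    have hm1 : (0:Int) - 1 = -1 := by ring
    rw [hm1] at hsplit
    have hcast : pvCountB n 1 0 (le_refl 1) = pvCountB n ((2:Int) ^ (0:Nat)) 0 (by norm_num) := by
      congr 1
    rw [hcast, hsplit]
    simp
  · -- n < 0: loop body never runs
    rename_i h
    rw [if_pos (by omega)]
    simp
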